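-- pv_equiv track=rewrite | github.com/jeury301/python-morsels | 14. lstrip/lstrip_solutions.py | v2_lstrip
-- ===== SOURCE A (Python) =====
-- def v2_lstrip(iterable, strip_value):
--     """Return iterable with strip_value items removed from beginning."""
--     stripped = []
--     iterator = iter(iterable)
--     try:
--         item = next(iterator)
--         while item == strip_value:
--             item = next(iterator)
--         stripped.append(item)
--     except StopIteration:
--         pass
--     else:
--         for item in iterator:
--             stripped.append(item)
--     return stripped
-- ===== SOURCE B (Python) =====
-- def v2_lstrip(iterable, strip_value):
--     """Return iterable with strip_value items removed from beginning."""
--     items = list(iterable)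
--     cut = 0
--     while cut < len(items) and items[cut] == strip_value:
--         cut += 1
--     return items[cut:]
-- ===== Notes on version B (the rewrite author's own statement) =====
-- stated objective: alternative
-- what changed: Instead of A's iterator skip-then-collect copy loop, B materializes the input, computes the cut index of the leading run with an index-based while loop, and returns a single slice items[cut:] (no per-item append of the tail).
import Mathlib
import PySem

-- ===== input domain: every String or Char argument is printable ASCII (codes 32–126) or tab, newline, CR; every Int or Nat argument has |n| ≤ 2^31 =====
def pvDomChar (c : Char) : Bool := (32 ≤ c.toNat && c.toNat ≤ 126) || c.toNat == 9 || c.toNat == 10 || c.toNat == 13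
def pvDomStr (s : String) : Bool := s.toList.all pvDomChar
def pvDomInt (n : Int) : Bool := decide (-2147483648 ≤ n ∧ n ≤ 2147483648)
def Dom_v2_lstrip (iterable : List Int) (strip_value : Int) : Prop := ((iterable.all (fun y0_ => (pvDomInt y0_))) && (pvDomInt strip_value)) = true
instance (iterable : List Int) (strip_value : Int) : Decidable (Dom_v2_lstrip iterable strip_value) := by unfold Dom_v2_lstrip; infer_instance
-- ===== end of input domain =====

-- B replaces A's iterator skip-then-collect copy loop by computing the cut index of the
-- leading run and returning one slice items[cut:]; objective: alternative decomposition.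


-- ===== PORT A =====
-- A advances an iterator past leading items equal to strip_value (StopIteration → []),
-- then appends the first non-matching item and every remaining item of the iterator.
def v2_lstrip (iterable : List Int) (strip_value : Int) : List Int :=
  match iterable with
  | [] => []                                   -- StopIteration during the skip loop: stripped stays []
  | item :: rest =>
      if item = strip_value then v2_lstrip rest strip_value   -- while item == strip_value: item = next(iterator)
      else item :: rest                        -- stripped.append(item); for item in iterator: append

-- ===== PORT B =====
-- while cut < len(items) and items[cut] == strip_value: cut += 1
def lstripCut (items : List Int) (strip_value : Int) (cut : Nat) : Nat :=
  if cut < items.length ∧ items[cut]! = strip_value then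
    lstripCut items strip_value (cut + 1)
  else cut
termination_by items.length - cut
decreasing_by omega

-- items = list(iterable); return items[cut:]
def v2_lstrip_alt (iterable : List Int) (strip_value : Int) : List Int :=
  PySem.List.slice iterable (some ((lstripCut iterable strip_value 0 : Nat) : Int)) none

-- ===== PRECONDITION & SPEC =====
def Spec_v2_lstrip (iterable : List Int) (strip_value : Int) (out : List Int) : Prop := out = v2_lstrip_alt iterable strip_value
instance (iterable : List Int) (strip_value : Int) (out : List Int) : Decidable (Spec_v2_lstrip iterable strip_value out) := by unfold Spec_v2_lstrip; infer_instance

-- ===== CLAIM (what is proved, stated in full; the proofs are below) =====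
def Claim_equal_v2_lstrip : Prop := ∀ (iterable : List Int) (strip_value : Int), Dom_v2_lstrip iterable strip_value → Spec_v2_lstrip iterable strip_value (v2_lstrip iterable strip_value)

-- ===== LEMMAS AND PROOFS =====
-- scanning x :: xs from index c+1 is scanning xs from index c, shifted by one
theorem lstripCut_cons_succ (x : Int) (xs : List Int) (s : Int) :
    ∀ n c, xs.length - c ≤ n → lstripCut (x :: xs) s (c + 1) = lstripCut xs s c + 1 := by
  intro n
  induction n with
  | zero =>
    intro c hc
    rw [lstripCut]
    conv_rhs => rw [lstripCut]
    have h1 : ¬ (c + 1 < (x :: xs).length ∧ (x :: xs)[c + 1]! = s) := by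
      simp only [List.length_cons]; omega
    have h2 : ¬ (c < xs.length ∧ xs[c]! = s) := by omega
    rw [if_neg h1, if_neg h2]
  | succ n ih =>
    intro c hc
    rw [lstripCut]
    conv_rhs => rw [lstripCut]
    by_cases hlen : c < xs.length
    · have hget : (x :: xs)[c + 1]! = xs[c]! := by
        simp [List.getElem!_cons_succ]
      by_cases hv : xs[c]! = s
      · have h1 : (c + 1 < (x :: xs).length ∧ (x :: xs)[c + 1]! = s) := by
          constructor
          · simp only [List.length_cons]; omega
          · rw [hget]; exact hv
        rw [if_pos h1, if_pos ⟨hlen, hv⟩]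
        exact ih (c + 1) (by omega)
      · have h1 : ¬ (c + 1 < (x :: xs).length ∧ (x :: xs)[c + 1]! = s) := by
          rw [hget]; tauto
        have h2 : ¬ (c < xs.length ∧ xs[c]! = s) := by tauto
        rw [if_neg h1, if_neg h2]
    · have h1 : ¬ (c + 1 < (x :: xs).length ∧ (x :: xs)[c + 1]! = s) := by
        simp only [List.length_cons]; omega
      have h2 : ¬ (c < xs.length ∧ xs[c]! = s) := by omega
      rw [if_neg h1, if_neg h2]

theorem ports_agree (s : Int) : ∀ l : List Int, v2_lstrip l s = l.drop (lstripCut l s 0) := by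
  intro l
  induction l with
  | nil =>
    rw [lstripCut]; simp [v2_lstrip]
  | cons x xs ih =>
    rw [lstripCut]
    by_cases h : x = s
    · have hc : (0 < (x :: xs).length ∧ (x :: xs)[0]! = s) := by
        simp [List.getElem!_cons_zero, h]
      simp only [hc, if_true]
      rw [lstripCut_cons_succ x xs s xs.length 0 (by omega)]
      simpa [v2_lstrip, h] using ih
    · have hc : ¬ (0 < (x :: xs).length ∧ (x :: xs)[0]! = s) := by
        simp [List.getElem!_cons_zero, h]
      simp [hc, v2_lstrip, h]

-- ===== VERDICT (by name: the statement is the Claim_ definition above) =====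
theorem v2_lstrip_spec : Claim_equal_v2_lstrip := by
  intro l s _
  unfold Spec_v2_lstrip v2_lstrip_alt
  rw [PySem.List.slice_from_natCast]
  exact ports_agree s l
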